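-- pv_equiv track=rewrite | github.com/hwstar-1204/Solve_Algorithm | LEETCODE/401. Binary Watch.py | readBinaryWatch2
-- ===== SOURCE A (Python) =====
-- from typing import List
-- from itertools import product
--
-- def readBinaryWatch2(turnedOn: int) -> List[str]:
--     def count_one(n: int) -> int:
--         return bin(n).count("1")
--
--     ans = []
--     for hour, minute in product(range(12), range(60)):
--         if count_one(hour) + count_one(minute) == turnedOn:
--             time = f"{hour}:{str(minute).zfill(2)}"
--             ans.append(time)
--     return ans
-- ===== SOURCE B (Python) =====
-- from typing import List
--
--
-- def readBinaryWatch2(turnedOn: int) -> List[str]: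
--     # index minutes by popcount once, then loop only over hours
--     bits_to_minutes = {}
--     for minute in range(60):
--         bits_to_minutes.setdefault(bin(minute).count("1"), []).append(minute)
--     ans = []
--     for hour in range(12):
--         remaining = turnedOn - bin(hour).count("1")
--         if remaining in bits_to_minutes:
--             for minute in bits_to_minutes[remaining]:
--                 ans.append(f"{hour}:{str(minute).zfill(2)}")
--     return ans
-- ===== Notes on version B (the rewrite author's own statement) =====
-- stated objective: alternative
-- what changed: Replaces the 12x60 product scan with a popcount->minutes dictionary built in one pass over range(60), so the hour loop does a single lookup instead of a 60-minute inner scan.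
import Mathlib
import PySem

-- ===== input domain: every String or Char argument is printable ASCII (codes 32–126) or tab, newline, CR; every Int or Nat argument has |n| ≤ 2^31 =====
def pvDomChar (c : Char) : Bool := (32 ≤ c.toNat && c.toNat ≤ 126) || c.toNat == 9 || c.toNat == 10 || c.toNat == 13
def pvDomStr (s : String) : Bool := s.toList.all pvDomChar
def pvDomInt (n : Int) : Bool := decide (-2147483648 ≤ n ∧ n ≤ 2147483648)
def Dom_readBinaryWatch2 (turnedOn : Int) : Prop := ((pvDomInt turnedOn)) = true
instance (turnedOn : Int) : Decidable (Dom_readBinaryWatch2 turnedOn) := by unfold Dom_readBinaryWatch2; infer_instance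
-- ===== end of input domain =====

-- B replaces A's 12×60 product scan by a popcount→minutes dictionary built once over range(60),
-- so the hour loop does one lookup per hour (objective: alternative algorithm).

-- bin(n).count("1"): popcount, exact for 0 ≤ n < 2^32 (both programs only apply it to 0..59);
-- the fuel argument 32 only makes the recursion structural.
def pvPopAux : Nat → Nat → Int
  | 0, _ => 0
  | f + 1, n => if n = 0 then 0 else ((n % 2 : Nat) : Int) + pvPopAux f (n / 2)

def countOne (n : Int) : Int := pvPopAux 32 n.natAbs

-- str(m).zfill(2): exact for sign-free strings (both programs only apply it to str(m), 0 ≤ m ≤ 59)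
def zfill2 (s : String) : String :=
  if 2 ≤ s.toList.length then s
  else String.ofList (List.replicate (2 - s.toList.length) '0' ++ s.toList)

-- f"{hour}:{str(minute).zfill(2)}"
def fmtTime (hour minute : Int) : String :=
  PySem.Int.toStr hour ++ ":" ++ zfill2 (PySem.Int.toStr minute)

-- ===== PORT A =====
def readBinaryWatch2 (turnedOn : Int) : List String :=
  ((PySem.List.pyRange 0 12 1).flatMap
      (fun hour => (PySem.List.pyRange 0 60 1).map (fun minute => (hour, minute)))).foldl
    (fun ans p =>
      if countOne p.1 + countOne p.2 == turnedOn then ans ++ [fmtTime p.1 p.2] else ans)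
    []

-- ===== PORT B =====
-- bits_to_minutes: one pass over range(60); setdefault(k, []).append(m) = modify with default []
def bitsToMinutes : PySem.Dict Int (List Int) :=
  (PySem.List.pyRange 0 60 1).foldl
    (fun d minute => d.modify (countOne minute) [] (fun l => l ++ [minute]))
    PySem.Dict.empty

def readBinaryWatch2_alt (turnedOn : Int) : List String :=
  (PySem.List.pyRange 0 12 1).foldl
    (fun ans hour =>
      match bitsToMinutes.get? (turnedOn - countOne hour) with
      | some ms => ms.foldl (fun ans minute => ans ++ [fmtTime hour minute]) ans
      | none => ans)
    []

-- ===== PRECONDITION & SPEC =====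
def Spec_readBinaryWatch2 (turnedOn : Int) (out : List String) : Prop := out = readBinaryWatch2_alt turnedOn
instance (turnedOn : Int) (out : List String) : Decidable (Spec_readBinaryWatch2 turnedOn out) := by unfold Spec_readBinaryWatch2; infer_instance

-- ===== CLAIM (what is proved, stated in full; the proofs are below) =====
def Claim_equal_readBinaryWatch2 : Prop := ∀ (turnedOn : Int), Dom_readBinaryWatch2 turnedOn → Spec_readBinaryWatch2 turnedOn (readBinaryWatch2 turnedOn)

-- ===== LEMMAS AND PROOFS =====

lemma count_minute_bound :
    ∀ m ∈ PySem.List.pyRange 0 60 1, 0 ≤ countOne m ∧ countOne m ≤ 5 := by decide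

set_option maxRecDepth 100000 in
lemma bitsToMinutes_eq : bitsToMinutes = PySem.Dict.mk
    [(0, [0]), (1, [1, 2, 4, 8, 16, 32]),
     (2, [3, 5, 6, 9, 10, 12, 17, 18, 20, 24, 33, 34, 36, 40, 48]),
     (3, [7, 11, 13, 14, 19, 21, 22, 25, 26, 28, 35, 37, 38, 41, 42, 44, 49, 50, 52, 56]),
     (4, [15, 23, 27, 29, 30, 39, 43, 45, 46, 51, 53, 54, 57, 58]),
     (5, [31, 47, 55, 59])] := by decide

lemma get?_bits_none (k : Int) (h : k < 0 ∨ 5 < k) : bitsToMinutes.get? k = none := by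
  rw [bitsToMinutes_eq]
  simp only [PySem.Dict.get?_mk_cons]
  split_ifs with h0 h1 h2 h3 h4 h5 <;>
    first
      | rfl
      | (exfalso; simp only [beq_iff_eq] at *; omega)

-- the dictionary's entry at k is exactly the minutes of range(60) with popcount k
lemma bits_lookup (k : Int) :
    (bitsToMinutes.get? k).getD []
      = (PySem.List.pyRange 0 60 1).filter (fun m => countOne m == k) := by
  by_cases h : 0 ≤ k ∧ k ≤ 5
  · obtain ⟨h1, h2⟩ := h
    rw [bitsToMinutes_eq]
    interval_cases k <;> decide
  · rw [get?_bits_none k (by omega), Option.getD_none]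
    symm
    rw [List.filter_eq_nil_iff]
    intro m hm
    have := count_minute_bound m hm
    simp only [beq_iff_eq]
    omega

lemma portA_eq (t : Int) :
    readBinaryWatch2 t
      = (PySem.List.pyRange 0 12 1).flatMap (fun h =>
          ((PySem.List.pyRange 0 60 1).filter (fun m => countOne h + countOne m == t)).map
            (fun m => fmtTime h m)) := by
  unfold readBinaryWatch2
  rw [PySem.List.foldl_append_if]
  rw [List.nil_append, List.filter_flatMap, List.map_flatMap]
  apply List.flatMap_congr
  intro h _
  rw [List.filter_map, List.map_map]
  rfl

lemma portB_eq (t : Int) :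
    readBinaryWatch2_alt t
      = (PySem.List.pyRange 0 12 1).flatMap (fun h =>
          ((bitsToMinutes.get? (t - countOne h)).getD []).map (fun m => fmtTime h m)) := by
  unfold readBinaryWatch2_alt
  rw [PySem.List.foldl_congr_mem
    (g := fun ans hour =>
      ans ++ ((bitsToMinutes.get? (t - countOne hour)).getD []).map (fun m => fmtTime hour m))]
  · rw [PySem.List.foldl_append_eq_flatMap, List.nil_append]
  · intro acc hour _
    cases bitsToMinutes.get? (t - countOne hour) with
    | none => simp
    | some ms =>
      show List.foldl (fun ans minute => ans ++ [fmtTime hour minute]) acc ms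
          = acc ++ List.map (fun m => fmtTime hour m) ms
      rw [PySem.List.foldl_append_singleton_eq_map]

-- ===== VERDICT (by name: the statement is the Claim_ definition above) =====
theorem readBinaryWatch2_spec : Claim_equal_readBinaryWatch2 := by
  intro t _
  unfold Spec_readBinaryWatch2
  rw [portA_eq, portB_eq]
  apply List.flatMap_congr
  intro h _
  rw [bits_lookup]
  congr 1
  apply List.filter_congr
  intro m _
  apply Bool.eq_iff_iff.mpr
  simp only [beq_iff_eq]
  omega
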